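-- pv_equiv track=rewrite | github.com/sarasmajic/Naloge-iz-p1 | IZPITI/Jan23/Jan23.py | skupne_povezave
-- ===== SOURCE A (Python) =====
-- def skupne_povezave(pot1, pot2):
--     stevec = 0
--
--     if len(pot1) > len(pot2):
--         dolzina = len(pot2)
--     else:
--         dolzina = len(pot1)
--
--     for i in range(dolzina - 1):
--         if pot1[i] == pot2[i] and pot1[i + 1] == pot2[i + 1]:
--             stevec += 1
--
--     return stevec
-- ===== SOURCE B (Python) =====
-- def skupne_povezave(pot1, pot2):
--     # Run-length algorithm: never compares adjacent positions directly.
--     # Each maximal run of L consecutive matching positions contains exactly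
--     # L - 1 adjacent matching pairs, so sum (run - 1) over closed runs.
--     total = 0
--     run = 0
--     for a, b in zip(pot1, pot2):
--         if a == b:
--             run += 1
--         else:
--             if run > 0:
--                 total += run - 1
--             run = 0
--     if run > 0:
--         total += run - 1
--     return total
-- ===== Notes on version B (the rewrite author's own statement) =====
-- stated objective: alternative
-- what changed: A counts indices i where positions i and i+1 both match, via indexed lookups over range(min-1); B never inspects adjacency at all: it iterates directly over zip, maintains the length of the current maximal run of matching positions and adds run-1 each time a run closes (each run of L matches contains exactly L-1 adjacent matching pairs).
import Mathlib
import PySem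

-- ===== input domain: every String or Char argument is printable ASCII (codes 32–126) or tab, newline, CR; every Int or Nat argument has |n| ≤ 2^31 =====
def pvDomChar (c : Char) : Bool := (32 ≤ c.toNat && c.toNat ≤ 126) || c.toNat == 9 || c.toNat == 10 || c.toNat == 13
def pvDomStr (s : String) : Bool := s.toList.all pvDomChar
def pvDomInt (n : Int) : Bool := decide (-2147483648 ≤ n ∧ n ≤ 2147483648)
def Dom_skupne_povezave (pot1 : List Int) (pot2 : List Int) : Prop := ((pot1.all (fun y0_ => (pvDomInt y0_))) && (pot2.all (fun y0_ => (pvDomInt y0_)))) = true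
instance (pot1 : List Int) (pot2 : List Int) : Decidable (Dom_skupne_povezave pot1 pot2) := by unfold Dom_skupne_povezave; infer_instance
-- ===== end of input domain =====

-- B replaces A's adjacent-pair comparison loop by a run-length algorithm: it tracks the
-- length of the current maximal run of matching positions and adds run-1 per closed run;
-- alternative decomposition, same cost.

-- ===== PORT A =====
def skupne_povezave (pot1 : List Int) (pot2 : List Int) : Int :=
  let stevec : Int := 0
  let dolzina : Int :=
    if (pot1.length : Int) > (pot2.length : Int) then (pot2.length : Int) else (pot1.length : Int)
  (PySem.List.pyRange 0 (dolzina - 1) 1).foldl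
    (fun stevec i =>
      if (PySem.List.pyGetD pot1 i 0 == PySem.List.pyGetD pot2 i 0)
          && (PySem.List.pyGetD pot1 (i + 1) 0 == PySem.List.pyGetD pot2 (i + 1) 0)
        then stevec + 1 else stevec)
    stevec

-- ===== PORT B =====
-- total, run accumulated over zip(pot1, pot2); closing a run of length L adds L - 1.
def skupne_povezave_alt (pot1 : List Int) (pot2 : List Int) : Int :=
  let s := (pot1.zip pot2).foldl
    (fun (s : Int × Int) (ab : Int × Int) =>
      if ab.1 == ab.2 then (s.1, s.2 + 1)
      else (if s.2 > 0 then s.1 + s.2 - 1 else s.1, 0))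
    ((0 : Int), (0 : Int))
  if s.2 > 0 then s.1 + s.2 - 1 else s.1

-- ===== PRECONDITION & SPEC =====
def Spec_skupne_povezave (pot1 : List Int) (pot2 : List Int) (out : Int) : Prop := out = skupne_povezave_alt pot1 pot2
instance (pot1 : List Int) (pot2 : List Int) (out : Int) : Decidable (Spec_skupne_povezave pot1 pot2 out) := by unfold Spec_skupne_povezave; infer_instance

-- ===== CLAIM (what is proved, stated in full; the proofs are below) =====
def Claim_equal_skupne_povezave : Prop := ∀ (pot1 : List Int) (pot2 : List Int), Dom_skupne_povezave pot1 pot2 → Spec_skupne_povezave pot1 pot2 (skupne_povezave pot1 pot2)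

-- ===== LEMMAS AND PROOFS =====

-- Number of adjacent (True, True) pairs in a boolean table.
def adjP (m : List Bool) : Nat := ((m.zip m.tail).filter (fun p => p.1 && p.2)).length

lemma adjP_cons_cons (x y : Bool) (l : List Bool) :
    adjP (x :: y :: l) = (if x && y then 1 else 0) + adjP (y :: l) := by
  simp only [adjP, List.tail_cons, List.zip_cons_cons, List.filter_cons]
  by_cases h : (x && y) = true
  · simp [h]; omega
  · simp [h]

lemma adjP_false_cons (m : List Bool) : adjP (false :: m) = adjP m := by
  cases m with
  | nil => rfl
  | cons y l => rw [adjP_cons_cons]; simp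

lemma adjP_replicate_true (r : Nat) : adjP (List.replicate r true) = r - 1 := by
  induction r with
  | zero => rfl
  | succ s ih =>
    cases s with
    | zero => rfl
    | succ u =>
      rw [List.replicate_succ, List.replicate_succ, adjP_cons_cons, ← List.replicate_succ]
      rw [ih]
      simp
      omega

lemma adjP_run_false (r : Nat) (m : List Bool) :
    adjP (List.replicate r true ++ false :: m) = (r - 1) + adjP m := by
  induction r with
  | zero => simp [adjP_false_cons]
  | succ s ih =>
    cases s with
    | zero => simp [List.replicate_succ, adjP_cons_cons, adjP_false_cons]
    | succ u =>
      rw [List.replicate_succ, List.cons_append, List.replicate_succ, List.cons_append,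
        adjP_cons_cons, ← List.cons_append, ← List.replicate_succ, ih]
      simp
      omega

-- B's loop step and finish, named for the proofs.
def pvBstep (s : Int × Int) (x : Bool) : Int × Int :=
  if x then (s.1, s.2 + 1) else (if s.2 > 0 then s.1 + s.2 - 1 else s.1, 0)

def pvBfin (s : Int × Int) : Int := if s.2 > 0 then s.1 + s.2 - 1 else s.1

-- Core invariant of B's run-length loop: with completed total t and pending run r,
-- finishing the loop over m yields t + (adjacent pairs of true^r ++ m).
lemma pv_run_invariant (m : List Bool) (t : Int) (r : Nat) :
    pvBfin (m.foldl pvBstep (t, (r : Int)))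
      = t + (adjP (List.replicate r true ++ m) : Int) := by
  induction m generalizing t r with
  | nil =>
    simp only [List.foldl_nil, List.append_nil, adjP_replicate_true, pvBfin]
    by_cases h : (r : Int) > 0
    · simp only [if_pos h]; omega
    · simp only [if_neg h]; omega
  | cons x m' ih =>
    rw [List.foldl_cons]
    cases x with
    | true =>
      have e : pvBstep (t, (r : Int)) true = (t, ((r + 1 : Nat) : Int)) := by
        simp [pvBstep]
      rw [e, ih]
      congr 2
      rw [List.replicate_succ']
      simp
    | false =>
      have e : pvBstep (t, (r : Int)) false
          = ((if (r : Int) > 0 then t + r - 1 else t), ((0 : Nat) : Int)) := by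
        simp [pvBstep]
      rw [e, ih, adjP_run_false]
      simp only [List.replicate_zero, List.nil_append]
      by_cases h : (r : Int) > 0
      · simp only [if_pos h]; push_cast; omega
      · simp only [if_neg h]
        have h0 : r = 0 := by omega
        subst h0; simp

-- The boolean table over zip is the zipWith equality table.
lemma pv_table_eq (pot1 pot2 : List Int) :
    (pot1.zip pot2).map (fun ab => ab.1 == ab.2) = List.zipWith (fun a b => a == b) pot1 pot2 := by
  induction pot1 generalizing pot2 with
  | nil => simp
  | cons a t ih =>
    cases pot2 with
    | nil => simp
    | cons b u => simp [ih]

-- B computes adjP of the equality table.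
lemma pv_alt_adjP (pot1 pot2 : List Int) :
    skupne_povezave_alt pot1 pot2 = (adjP (List.zipWith (fun a b => a == b) pot1 pot2) : Int) := by
  have h : skupne_povezave_alt pot1 pot2
      = pvBfin (((pot1.zip pot2).map (fun ab => ab.1 == ab.2)).foldl pvBstep
          ((0 : Int), ((0 : Nat) : Int))) := by
    rw [List.foldl_map]
    rfl
  rw [h, pv_run_invariant, pv_table_eq]
  simp

-- A's index-based count over range(min-1) equals the pair count on the equality table.
lemma pv_core (pot1 pot2 : List Int) :
    (List.range (min pot1.length pot2.length - 1)).countP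
        (fun j => (pot1.getD j 0 == pot2.getD j 0) && (pot1.getD (j+1) 0 == pot2.getD (j+1) 0))
    = adjP (List.zipWith (fun a b => a == b) pot1 pot2) := by
  induction pot1 generalizing pot2 with
  | nil => simp [adjP]
  | cons a t1 ih =>
    cases pot2 with
    | nil => simp [adjP]
    | cons b t2 =>
      cases t1 with
      | nil => simp [adjP]
      | cons a' t1' =>
        cases t2 with
        | nil => simp [adjP]
        | cons b' t2' =>
          have h1 : min (a :: a' :: t1').length (b :: b' :: t2').length - 1
              = (min (a' :: t1').length (b' :: t2').length - 1) + 1 := by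
            simp only [List.length_cons]; omega
          rw [h1, List.range_succ_eq_map, List.countP_cons, List.countP_map]
          have h2 := ih (b' :: t2')
          simp only [Function.comp_def, Nat.succ_eq_add_one, List.getD_cons_succ,
            List.getD_cons_zero, List.zipWith_cons_cons] at h2 ⊢
          rw [h2, adjP_cons_cons]
          by_cases h : ((a == b) && (a' == b')) = true
          · simp [h]; omega
          · simp [h]

theorem skupne_povezave_spec : Claim_equal_skupne_povezave := by
  intro pot1 pot2 _
  unfold Spec_skupne_povezave
  rw [pv_alt_adjP, ← pv_core]
  unfold skupne_povezave
  rw [PySem.List.foldl_if_add_one]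
  rw [PySem.List.pyRange_one]
  have hT : (((if (pot1.length : Int) > (pot2.length : Int) then (pot2.length : Int) else (pot1.length : Int)) - 1) - 0).toNat
      = min pot1.length pot2.length - 1 := by
    split <;> omega
  rw [hT, List.countP_map, zero_add]
  congr 1
  apply List.countP_congr
  intro j _
  simp only [Function.comp_def, zero_add, PySem.List.pyGetD_natCast]
  have hc : (↑j + 1 : Int) = ((j + 1 : Nat) : Int) := by push_cast; ring
  rw [hc, PySem.List.pyGetD_natCast, PySem.List.pyGetD_natCast]
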